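-- pv_equiv track=rewrite | github.com/ZachSchlosser/endemic-grant-agent | ai_jargon_replacer.py | _choose_replacement
-- ===== SOURCE A (Python) =====
-- from typing import Dict, List, Tuple, Optional, Set
--
-- def _choose_replacement(phrase: str, replacements: List[str], text: str, position: int) -> str:
--     """Choose the best replacement based on context"""
--     # Simple context analysis - look at surrounding words
--     context_window = 100
--     start = max(0, position - context_window)
--     end = min(len(text), position + len(phrase) + context_window)
--     context = text[start:end].lower()
--
--     # Basic heuristics for replacement selection
--     if 'research' in context or 'study' in context:
--         # Prefer more academic alternatives
--         academic_words = ['examine', 'investigate', 'analyze']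
--         for replacement in replacements:
--             if replacement in academic_words:
--                 return replacement
--
--     if 'business' in context or 'market' in context:
--         # Prefer business-friendly alternatives
--         business_words = ['utilize', 'employ', 'apply']
--         for replacement in replacements:
--             if replacement in business_words:
--                 return replacement
--
--     # Default to first replacement
--     return replacements[0]
-- ===== SOURCE B (Python) =====
-- # Inverted index + single argmin pass: instead of A's rule-first nested loops,
-- # map each special replacement word to its rule rank and scan replacements ONCE,
-- # keeping the best-ranked replacement whose rule is triggered by the context.
-- _WORD_CATEGORY = {'examine': 0, 'investigate': 0, 'analyze': 0,
--                   'utilize': 1, 'employ': 1, 'apply': 1}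
-- _TRIGGERS = (('research', 'study'), ('business', 'market'))
--
-- def _choose_replacement(phrase, replacements, text, position):
--     start = max(0, position - 100)
--     end = min(len(text), position + len(phrase) + 100)
--     context = text[start:end].lower()
--     active = [any(t in context for t in pair) for pair in _TRIGGERS]
--     best = None  # (rank, word): lowest-ranked triggered replacement seen so far
--     for r in replacements:
--         c = _WORD_CATEGORY.get(r)
--         if c is not None and active[c] and (best is None or c < best[0]):
--             best = (c, r)
--     return best[1] if best is not None else replacements[0]
-- ===== Notes on version B (the rewrite author's own statement) =====
-- stated objective: alternative
-- what changed: Inverts A's control structure: a word->rule-rank index plus a single argmin pass over replacements (keeping the best-ranked replacement whose rule is triggered) replaces A's rule-first chain with an inner scan of replacements per rule.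
import Mathlib
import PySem

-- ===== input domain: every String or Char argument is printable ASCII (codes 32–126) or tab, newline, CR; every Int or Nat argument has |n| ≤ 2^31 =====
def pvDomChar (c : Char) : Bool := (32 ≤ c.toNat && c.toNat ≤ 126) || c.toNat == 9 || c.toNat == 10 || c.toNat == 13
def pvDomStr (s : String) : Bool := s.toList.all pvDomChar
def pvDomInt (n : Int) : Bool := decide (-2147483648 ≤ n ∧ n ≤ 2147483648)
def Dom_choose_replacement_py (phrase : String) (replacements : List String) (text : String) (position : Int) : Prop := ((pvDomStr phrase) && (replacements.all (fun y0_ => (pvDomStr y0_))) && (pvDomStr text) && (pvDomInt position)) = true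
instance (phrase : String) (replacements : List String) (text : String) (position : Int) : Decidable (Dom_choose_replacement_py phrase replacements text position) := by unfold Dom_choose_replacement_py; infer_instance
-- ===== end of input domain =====

-- B inverts A's structure: a word->rule-rank index and one argmin pass over the
-- replacements replaces A's rule-first branch chain with inner scans (objective: alternative).

-- ===== PORT A =====
-- 'for replacement in replacements: if replacement in words: return replacement'
def pvFirstIn (rs : List String) (words : List String) : Option String :=
  match rs with
  | [] => none
  | r :: t => if words.contains r then some r else pvFirstIn t words

-- A's branch chain after 'context' has been computed
def pvBranchesA (replacements : List String) (context : String) : String :=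
  match (if PySem.Str.isIn "research" context || PySem.Str.isIn "study" context then
           pvFirstIn replacements ["examine", "investigate", "analyze"]
         else none) with
  | some r => r
  | none =>
    match (if PySem.Str.isIn "business" context || PySem.Str.isIn "market" context then
             pvFirstIn replacements ["utilize", "employ", "apply"]
           else none) with
    | some r => r
    | none => replacements.headD ""   -- replacements[0]; Pre_ excludes the empty list (IndexError)

def choose_replacement_py (phrase : String) (replacements : List String) (text : String) (position : Int) : String :=
  pvBranchesA replacements
    (PySem.Str.lower (PySem.Str.slice text (some (max 0 (position - 100)))
      (some (min (PySem.Str.len text) (position + PySem.Str.len phrase + 100)))))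

-- ===== PORT B =====
-- _WORD_CATEGORY: each special replacement word -> index of the rule that prefers it
def pvWordCategory : PySem.Dict String Int :=
  PySem.Dict.ofList [("examine", 0), ("investigate", 0), ("analyze", 0),
                     ("utilize", 1), ("employ", 1), ("apply", 1)]

-- _TRIGGERS
def pvTriggers : List (List String) := [["research", "study"], ["business", "market"]]

-- the single pass 'for r in replacements: …' with accumulator best
def pvScan (active : List Bool) : List String → Option (Int × String) → Option (Int × String)
  | [], best => best
  | r :: rest, best =>
    let best' :=
      match PySem.Dict.get? pvWordCategory r with
      | some c =>
        -- active[c]: c is always 0 or 1, in range for the two-rule active list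
        if ((PySem.List.pyGet? active c).getD false)
            && (match best with | none => true | some b => decide (c < b.1)) then
          some (c, r)
        else best
      | none => best
    pvScan active rest best'

def choose_replacement_py_alt (phrase : String) (replacements : List String) (text : String) (position : Int) : String :=
  let context := PySem.Str.lower (PySem.Str.slice text (some (max 0 (position - 100)))
      (some (min (PySem.Str.len text) (position + PySem.Str.len phrase + 100))))
  let active := pvTriggers.map (fun pair => pair.any (fun t => PySem.Str.isIn t context))
  match pvScan active replacements none with
  | some b => b.2
  | none => replacements.headD ""   -- replacements[0]; Pre_ excludes the empty list

-- ===== PRECONDITION & SPEC =====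
-- Pre_ excludes exactly replacements = [], where A raises IndexError on 'replacements[0]'.
def Pre_choose_replacement_py (phrase : String) (replacements : List String) (text : String) (position : Int) : Prop :=
  replacements ≠ []
instance (phrase : String) (replacements : List String) (text : String) (position : Int) : Decidable (Pre_choose_replacement_py phrase replacements text position) := by unfold Pre_choose_replacement_py; infer_instance

def pvWitness_choose_replacement_py : String × List String × String × Int :=
  ("use", ["try"], "a short study note", 8)

def Spec_choose_replacement_py (phrase : String) (replacements : List String) (text : String) (position : Int) (out : String) : Prop := out = choose_replacement_py_alt phrase replacements text position
instance (phrase : String) (replacements : List String) (text : String) (position : Int) (out : String) : Decidable (Spec_choose_replacement_py phrase replacements text position out) := by unfold Spec_choose_replacement_py; infer_instance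

-- ===== CLAIM (what is proved, stated in full; the proofs are below) =====
def Claim_equal_choose_replacement_py : Prop := ∀ (phrase : String) (replacements : List String) (text : String) (position : Int), Dom_choose_replacement_py phrase replacements text position → Pre_choose_replacement_py phrase replacements text position → Spec_choose_replacement_py phrase replacements text position (choose_replacement_py phrase replacements text position)

-- ===== LEMMAS AND PROOFS =====

def pvAcad : List String := ["examine", "investigate", "analyze"]
def pvBus : List String := ["utilize", "employ", "apply"]

-- the category lookup, characterised by membership in the two word lists
theorem pvCat_spec (r : String) :
    PySem.Dict.get? pvWordCategory r =
      if pvAcad.contains r then some 0 else if pvBus.contains r then some 1 else none := by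
  by_cases h1 : r = "examine"; · subst h1; rfl
  by_cases h2 : r = "investigate"; · subst h2; rfl
  by_cases h3 : r = "analyze"; · subst h3; rfl
  by_cases h4 : r = "utilize"; · subst h4; rfl
  by_cases h5 : r = "employ"; · subst h5; rfl
  by_cases h6 : r = "apply"; · subst h6; rfl
  have hA : r ∉ pvAcad := by simp [pvAcad, h1, h2, h3]
  have hB : r ∉ pvBus := by simp [pvBus, h4, h5, h6]
  have e1 : ("examine" == r) = false := beq_eq_false_iff_ne.mpr (Ne.symm h1)
  have e2 : ("investigate" == r) = false := beq_eq_false_iff_ne.mpr (Ne.symm h2)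
  have e3 : ("analyze" == r) = false := beq_eq_false_iff_ne.mpr (Ne.symm h3)
  have e4 : ("utilize" == r) = false := beq_eq_false_iff_ne.mpr (Ne.symm h4)
  have e5 : ("employ" == r) = false := beq_eq_false_iff_ne.mpr (Ne.symm h5)
  have e6 : ("apply" == r) = false := beq_eq_false_iff_ne.mpr (Ne.symm h6)
  simp [pvWordCategory, PySem.Dict.ofList, PySem.Dict.get?, PySem.Dict.update,
    PySem.Dict.insert, PySem.Dict.contains, PySem.Dict.empty, List.find?,
    hA, hB, e1, e2, e3, e4, e5, e6]

-- the Option-valued version of A's branch chain, for the induction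

-- the Option-valued version of A's branch chain, for the induction
def pvChain (a0 a1 : Bool) (reps : List String) : Option (Int × String) :=
  match (if a0 then pvFirstIn reps pvAcad else none) with
  | some r => some (0, r)
  | none =>
    match (if a1 then pvFirstIn reps pvBus else none) with
    | some r => some (1, r)
    | none => none

theorem pvScan_rank0 (a0 a1 : Bool) (reps : List String) (w : String) :
    pvScan [a0, a1] reps (some (0, w)) = some (0, w) := by
  induction reps with
  | nil => rfl
  | cons r rest ih =>
    simp only [pvScan, pvCat_spec r]
    split_ifs with h1 h2 <;> simp [ih]

theorem pvScan_rank1 (a0 a1 : Bool) (reps : List String) (w : String) :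
    pvScan [a0, a1] reps (some (1, w)) =
      match (if a0 then pvFirstIn reps pvAcad else none) with
      | some r => some (0, r)
      | none => some (1, w) := by
  induction reps generalizing w with
  | nil => cases a0 <;> simp [pvScan, pvFirstIn]
  | cons r rest ih =>
    simp only [pvScan, pvCat_spec r]
    by_cases hA : pvAcad.contains r
    · have hA' : r ∈ pvAcad := by simpa using hA
      simp only [hA, if_pos, PySem.List.pyGet?, PySem.List.pyIdx?]
      cases a0 with
      | true => simp [pvScan_rank0, pvFirstIn, hA']
      | false => simp [ih, pvFirstIn]
    · have hA' : r ∉ pvAcad := by simpa using hA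
      by_cases hB : r ∈ pvBus
      · simp [hB, pvFirstIn, hA', ih]
      · simp [hB, pvFirstIn, hA', ih]

theorem pvScan_none (a0 a1 : Bool) (reps : List String) :
    pvScan [a0, a1] reps none = pvChain a0 a1 reps := by
  induction reps with
  | nil => cases a0 <;> cases a1 <;> rfl
  | cons r rest ih =>
    simp only [pvScan, pvCat_spec r]
    by_cases hA : pvAcad.contains r
    · have hA' : r ∈ pvAcad := by simpa using hA
      have hB' : r ∉ pvBus := by
        rcases (show r = "examine" ∨ r = "investigate" ∨ r = "analyze" by
          simpa [pvAcad] using hA) with h | h | h <;> subst h <;> decide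
      simp only [hA, if_pos, PySem.List.pyGet?, PySem.List.pyIdx?]
      cases a0 with
      | true => simp [pvScan_rank0, pvChain, pvFirstIn, hA']
      | false => simp [ih, pvChain, pvFirstIn, hA', hB']
    · have hA' : r ∉ pvAcad := by simpa using hA
      have hAf : pvAcad.contains r = false := by simpa using hA
      by_cases hB : pvBus.contains r
      · have hB' : r ∈ pvBus := by simpa using hB
        simp only [hAf, hB, if_pos, Bool.false_eq_true, if_neg, not_false_eq_true,
          PySem.List.pyGet?, PySem.List.pyIdx?]
        cases a1 with
        | true => simp [pvScan_rank1, pvChain, pvFirstIn, hA', hB']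
        | false => simp [ih, pvChain, pvFirstIn, hA', hB']
      · have hB' : r ∉ pvBus := by simpa using hB
        simp [hAf, hB, pvFirstIn, ih, pvChain, hA', hB']

theorem pvBranchesA_eq_scan (reps : List String) (context : String) :
    pvBranchesA reps context =
      (match pvScan
          (pvTriggers.map (fun pair => pair.any (fun t => PySem.Str.isIn t context)))
          reps none with
       | some b => b.2
       | none => reps.headD "") := by
  have hact : pvTriggers.map (fun pair => pair.any (fun t => PySem.Str.isIn t context)) =
      [PySem.Str.isIn "research" context || PySem.Str.isIn "study" context,
       PySem.Str.isIn "business" context || PySem.Str.isIn "market" context] := by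
    simp [pvTriggers]
  rw [hact, pvScan_none]
  unfold pvBranchesA pvChain
  cases h0 : (if PySem.Str.isIn "research" context || PySem.Str.isIn "study" context then
      pvFirstIn reps pvAcad else none) <;>
  cases h1 : (if PySem.Str.isIn "business" context || PySem.Str.isIn "market" context then
      pvFirstIn reps pvBus else none) <;>
  simp_all [pvAcad, pvBus]

-- ===== VERDICT (by name: the statement is the Claim_ definition above) =====
theorem choose_replacement_py_spec : Claim_equal_choose_replacement_py := by
  intro phrase replacements text position _ _
  unfold Spec_choose_replacement_py choose_replacement_py choose_replacement_py_alt
  exact pvBranchesA_eq_scan replacements _
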